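-- pv_equiv track=rewrite | github.com/shasankp000/Lexis | compression/alphabet/morph_codes.py | _decode_factoradic
-- ===== SOURCE A (Python) =====
-- from math import factorial
-- from typing import Dict, List
--
-- def _decode_factoradic(digits: List[int]) -> int:
--     if not digits:
--         return 0
--     total = 0
--     length = len(digits)
--     for idx, digit in enumerate(digits):
--         weight = factorial(length - 1 - idx)
--         total += digit * weight
--     return total
-- ===== SOURCE B (Python) =====
-- def _decode_factoradic(digits):
--     total = 0
--     fact = 1
--     k = 1
--     for d in reversed(digits):
--         total += d * fact
--         fact *= k
--         k += 1
--     return total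
-- ===== Notes on version B (the rewrite author's own statement) =====
-- stated objective: faster
-- what changed: Replaced the per-digit factorial(length-1-idx) recomputation by a single reversed pass that maintains a running factorial, so each weight costs one multiplication.
import Mathlib
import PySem

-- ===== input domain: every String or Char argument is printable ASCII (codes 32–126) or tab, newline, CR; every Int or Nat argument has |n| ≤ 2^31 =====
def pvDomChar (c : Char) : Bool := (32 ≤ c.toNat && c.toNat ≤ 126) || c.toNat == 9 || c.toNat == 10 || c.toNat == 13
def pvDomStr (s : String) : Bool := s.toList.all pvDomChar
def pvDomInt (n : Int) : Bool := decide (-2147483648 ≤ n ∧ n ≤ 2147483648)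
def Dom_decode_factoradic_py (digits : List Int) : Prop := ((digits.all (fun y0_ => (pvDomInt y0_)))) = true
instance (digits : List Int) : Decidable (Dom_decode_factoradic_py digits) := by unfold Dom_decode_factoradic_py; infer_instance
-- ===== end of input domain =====

-- B replaces A's per-index factorial recomputation by a single least-significant-first
-- pass with a running factorial (objective: faster, asymptotic O(n) vs O(n^2)).

-- ===== PORT A =====
-- literal transliteration of A: for idx, digit in enumerate(digits): total += digit * factorial(length-1-idx)
-- ((length - 1 - idx).toNat is exact here: length = len(digits) and 0 ≤ idx < length, so the argument is nonnegative)
def decode_factoradic_py (digits : List Int) : Int :=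
  if digits = [] then 0
  else
    let length : Int := (digits.length : Int)
    (PySem.List.enumerate digits 0).foldl
      (fun total p => total + p.2 * (Nat.factorial (length - 1 - p.1).toNat : Int)) 0

-- ===== PORT B =====
-- loop of Source B: for d in reversed(digits): total += d * fact; fact *= k; k += 1
def bLoop : List Int → Int → Int → Int → Int
  | [], total, _, _ => total
  | d :: ds, total, fact, k => bLoop ds (total + d * fact) (fact * k) (k + 1)

def decode_factoradic_py_alt (digits : List Int) : Int :=
  bLoop digits.reverse 0 1 1

-- ===== PRECONDITION & SPEC =====
def Spec_decode_factoradic_py (digits : List Int) (out : Int) : Prop := out = decode_factoradic_py_alt digits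
instance (digits : List Int) (out : Int) : Decidable (Spec_decode_factoradic_py digits out) := by unfold Spec_decode_factoradic_py; infer_instance

-- ===== CLAIM (what is proved, stated in full; the proofs are below) =====
def Claim_equal_decode_factoradic_py : Prop := ∀ (digits : List Int), Dom_decode_factoradic_py digits → Spec_decode_factoradic_py digits (decode_factoradic_py digits)

-- ===== LEMMAS AND PROOFS =====

-- value of an LSB-first digit list, with place weights starting at m!
def pvS (m : Nat) : List Int → Int
  | [] => 0
  | y :: ys => y * (Nat.factorial m : Int) + pvS (m + 1) ys

theorem pvS_append (y : Int) : ∀ (as : List Int) (m : Nat),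
    pvS m (as ++ [y]) = pvS m as + y * (Nat.factorial (m + as.length) : Int) := by
  intro as
  induction as with
  | nil => intro m; simp [pvS]
  | cons a as ih =>
      intro m
      simp only [List.cons_append, pvS, ih (m + 1), List.length_cons]
      ring_nf

theorem bLoop_eq : ∀ (ys : List Int) (t : Int) (m : Nat),
    bLoop ys t (Nat.factorial m : Int) ((m : Int) + 1) = t + pvS m ys := by
  intro ys
  induction ys with
  | nil => intro t m; simp [bLoop, pvS]
  | cons y ys ih =>
      intro t m
      have h : (Nat.factorial m : Int) * ((m : Int) + 1) = (Nat.factorial (m + 1) : Int) := by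
        rw [Nat.factorial_succ]; push_cast; ring
      simp only [bLoop, h]
      have := ih (t + y * (Nat.factorial m : Int)) (m + 1)
      push_cast at this ⊢
      rw [this]
      simp [pvS]
      ring

theorem wsum_eq_pvS_reverse : ∀ (xs : List Int) (s n : Int), n = s + xs.length →
    ((PySem.List.enumerate xs s).map
      (fun p => p.2 * (Nat.factorial (n - 1 - p.1).toNat : Int))).sum
    = pvS 0 xs.reverse := by
  intro xs
  induction xs with
  | nil => intro s n _; simp [PySem.List.enumerate_nil, pvS]
  | cons y xs ih =>
      intro s n hn
      rw [PySem.List.enumerate_cons]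
      simp only [List.map_cons, List.sum_cons]
      rw [ih (s + 1) n (by simp at hn ⊢; omega)]
      have hidx : (n - 1 - s).toNat = xs.length := by
        simp at hn; omega
      rw [List.reverse_cons, pvS_append, hidx]
      simp [List.length_reverse]
      ring

theorem decode_eq (digits : List Int) :
    decode_factoradic_py digits = decode_factoradic_py_alt digits := by
  unfold decode_factoradic_py decode_factoradic_py_alt
  by_cases h : digits = []
  · simp [h, bLoop]
  · simp only [h, if_false]
    rw [PySem.List.foldl_add, zero_add]
    have hb := bLoop_eq digits.reverse 0 0
    simp only [Nat.factorial_zero, Nat.cast_zero, Nat.cast_one, zero_add] at hb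
    rw [hb]
    exact wsum_eq_pvS_reverse digits 0 (digits.length : Int) (by simp)

-- ===== VERDICT (by name: the statement is the Claim_ definition above) =====
theorem decode_factoradic_py_spec : Claim_equal_decode_factoradic_py := by
  intro digits _
  unfold Spec_decode_factoradic_py
  exact decode_eq digits
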